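-- pv_equiv track=rewrite | github.com/tchamberlin/farkle | farkle/rules.py | combinations_with_remainder
-- ===== SOURCE A (Python) =====
-- from typing import Sized
-- from itertools import combinations, product
--
-- def combinations_with_remainder(iterable: Sized, size: int):
--     def mask(lst, p, v):
--         return [lst[i] for i, e in enumerate(p) if e == v]
--
--     if size < 0:
--         raise ValueError(f"Illegal {size} value {size}")
--
--     if size > len(iterable):
--         raise ValueError(f"Requested size {size} is greater than length of given iterable ({len(iterable)})")
--
--     return [
--         (mask(iterable, p, 1), mask(iterable, p, 0)) for p in product([1, 0], repeat=len(iterable)) if sum(p) == size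
--     ]
-- ===== SOURCE B (Python) =====
-- def combinations_with_remainder(iterable, size: int):
--     if size < 0:
--         raise ValueError(f"Illegal {size} value {size}")
--     items = list(iterable)
--     if size > len(items):
--         raise ValueError(
--             f"Requested size {size} is greater than length of given iterable ({len(items)})"
--         )
--     out = []
--
--     def go(i, remaining, chosen, rest):
--         if i == len(items):
--             if remaining == 0:
--                 out.append((chosen[:], rest[:]))
--             return
--         x = items[i]
--         if remaining > 0:
--             chosen.append(x)
--             go(i + 1, remaining - 1, chosen, rest)
--             chosen.pop()
--         rest.append(x)
--         go(i + 1, remaining, chosen, rest)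
--         rest.pop()
--
--     go(0, size, [], [])
--     return out
-- ===== Notes on version B (the rewrite author's own statement) =====
-- stated objective: alternative
-- what changed: B replaces A's enumeration of all 2^n bitmasks from product([1,0]) filtered by sum==size with a direct include/exclude recursion over positions with shared chosen/rest accumulators, emitting pairs in the same lexicographic order.
import Mathlib
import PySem

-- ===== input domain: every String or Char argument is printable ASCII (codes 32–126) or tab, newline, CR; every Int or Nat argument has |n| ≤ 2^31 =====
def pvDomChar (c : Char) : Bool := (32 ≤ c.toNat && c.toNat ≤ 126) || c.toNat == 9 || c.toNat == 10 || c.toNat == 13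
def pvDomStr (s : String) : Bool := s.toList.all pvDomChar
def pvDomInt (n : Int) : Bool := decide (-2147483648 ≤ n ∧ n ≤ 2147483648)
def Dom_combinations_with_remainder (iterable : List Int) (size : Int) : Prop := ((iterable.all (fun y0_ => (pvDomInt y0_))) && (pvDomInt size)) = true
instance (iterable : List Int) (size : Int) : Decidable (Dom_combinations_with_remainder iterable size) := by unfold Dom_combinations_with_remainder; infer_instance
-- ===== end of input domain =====

-- B replaces A's filtered enumeration of all 2^n bitmasks with a direct include/exclude
-- recursion over positions; the two agree (same values, same order) on all valid sizes.

-- ===== PORT A =====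
-- product([1, 0], repeat=n): first coordinate varies slowest, per-position order [1, 0]
def cwrProducts : Nat → List (List Int)
  | 0 => [[]]
  | n + 1 => ([1, 0] : List Int).flatMap (fun b => (cwrProducts n).map (fun p => b :: p))

-- mask(lst, p, v) = [lst[i] for i, e in enumerate(p) if e == v]
def cwrMask (lst p : List Int) (v : Int) : List Int :=
  (PySem.List.enumerate p).filterMap (fun ie => if ie.2 = v then PySem.List.pyGet? lst ie.1 else none)

def combinations_with_remainder (iterable : List Int) (size : Int) : List (List Int × List Int) :=
  if size < 0 then []            -- Python raises ValueError here (excluded by Pre_)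
  else if size > (iterable.length : Int) then []   -- Python raises ValueError here (excluded by Pre_)
  else ((cwrProducts iterable.length).filter (fun p => p.sum = size)).map
    (fun p => (cwrMask iterable p 1, cwrMask iterable p 0))

-- ===== PORT B =====
-- go(i, remaining, chosen, rest): include items[i] first (when remaining > 0), then exclude it
def cwrGo (items : List Int) (remaining : Int) (chosen rest : List Int) :
    List (List Int × List Int) :=
  match items with
  | [] => if remaining = 0 then [(chosen, rest)] else []
  | x :: xs =>
      (if remaining > 0 then cwrGo xs (remaining - 1) (chosen ++ [x]) rest else []) ++
        cwrGo xs remaining chosen (rest ++ [x])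

def combinations_with_remainder_alt (iterable : List Int) (size : Int) : List (List Int × List Int) :=
  if size < 0 then []            -- Python raises ValueError here (excluded by Pre_)
  else if size > (iterable.length : Int) then []   -- Python raises ValueError here (excluded by Pre_)
  else cwrGo iterable size [] []

-- ===== PRECONDITION & SPEC =====
-- Pre_ excludes exactly the inputs on which the Python raises ValueError: size < 0 or size > len(iterable)
def Pre_combinations_with_remainder (iterable : List Int) (size : Int) : Prop :=
  0 ≤ size ∧ size ≤ (iterable.length : Int)
instance (iterable : List Int) (size : Int) : Decidable (Pre_combinations_with_remainder iterable size) := by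
  unfold Pre_combinations_with_remainder; infer_instance

def pvWitness_combinations_with_remainder : List Int × Int := ([1, 2, 3], 2)

def Spec_combinations_with_remainder (iterable : List Int) (size : Int) (out : List (List Int × List Int)) : Prop := out = combinations_with_remainder_alt iterable size
instance (iterable : List Int) (size : Int) (out : List (List Int × List Int)) : Decidable (Spec_combinations_with_remainder iterable size out) := by unfold Spec_combinations_with_remainder; infer_instance

-- ===== CLAIM (what is proved, stated in full; the proofs are below) =====
def Claim_equal_combinations_with_remainder : Prop := ∀ (iterable : List Int) (size : Int), Dom_combinations_with_remainder iterable size → Pre_combinations_with_remainder iterable size → Spec_combinations_with_remainder iterable size (combinations_with_remainder iterable size)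

-- ===== LEMMAS AND PROOFS =====

-- zip-formulated mask, used as the meeting point of the two proofs
def cwrMaskZ (lst p : List Int) (v : Int) : List Int :=
  (lst.zip p).filterMap (fun xe => if xe.2 = v then some xe.1 else none)

lemma cwrMask_aux (v : Int) : ∀ (p lst pre : List Int), p.length = lst.length →
    (PySem.List.enumerate p (pre.length : Int)).filterMap
      (fun ie => if ie.2 = v then PySem.List.pyGet? (pre ++ lst) ie.1 else none)
      = cwrMaskZ lst p v := by
  intro p
  induction p with
  | nil => intro lst pre h; cases lst with
    | nil => simp [PySem.List.enumerate, cwrMaskZ]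
    | cons x xs => simp at h
  | cons e p ih =>
    intro lst pre h
    cases lst with
    | nil => simp at h
    | cons x xs =>
      simp only [List.length_cons] at h
      have h' : p.length = xs.length := by omega
      rw [PySem.List.enumerate_cons]
      simp only [List.filterMap_cons]
      have hget : PySem.List.pyGet? (pre ++ x :: xs) (pre.length : Int) = some x := by
        rw [PySem.List.pyGet?_natCast]
        simp
      have hrec : (PySem.List.enumerate p ((pre.length : Int) + 1)).filterMap
          (fun ie => if ie.2 = v then PySem.List.pyGet? (pre ++ x :: xs) ie.1 else none)
          = cwrMaskZ xs p v := by
        have := ih xs (pre ++ [x]) h'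
        simpa [List.append_assoc, Nat.cast_add] using this
      by_cases he : e = v
      · simp only [he, hget, hrec, cwrMaskZ, List.zip_cons_cons, List.filterMap_cons]
      · simp only [hrec, cwrMaskZ, List.zip_cons_cons, List.filterMap_cons, if_neg he]

lemma cwrMask_eq_maskZ (lst p : List Int) (v : Int) (h : p.length = lst.length) :
    cwrMask lst p v = cwrMaskZ lst p v := by
  have := cwrMask_aux v p lst [] h
  simpa [cwrMask, PySem.List.enumerate] using this

lemma cwrProducts_mem {n : Nat} {p : List Int} (hp : p ∈ cwrProducts n) :
    p.length = n ∧ 0 ≤ p.sum := by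
  induction n generalizing p with
  | zero => simp [cwrProducts] at hp; simp [hp]
  | succ n ih =>
    simp only [cwrProducts, List.mem_flatMap, List.mem_map] at hp
    obtain ⟨b, hb, q, hq, rfl⟩ := hp
    obtain ⟨hl, hs⟩ := ih hq
    have hb' : b = 1 ∨ b = 0 := by simpa using hb
    constructor
    · simp [hl]
    · rcases hb' with rfl | rfl <;> simp <;> omega

lemma cwrGo_eq : ∀ (lst : List Int) (rem : Int) (chosen rest : List Int),
    cwrGo lst rem chosen rest =
      ((cwrProducts lst.length).filter (fun p => p.sum = rem)).map
        (fun p => (chosen ++ cwrMaskZ lst p 1, rest ++ cwrMaskZ lst p 0)) := by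
  intro lst
  induction lst with
  | nil =>
    intro rem chosen rest
    by_cases h : rem = 0 <;>
      simp [cwrGo, cwrProducts, cwrMaskZ, h, eq_comm]
  | cons x xs ih =>
    intro rem chosen rest
    have hsplit : cwrProducts (x :: xs).length =
        (cwrProducts xs.length).map (fun p => (1 : Int) :: p) ++
          (cwrProducts xs.length).map (fun p => (0 : Int) :: p) := by
      simp [cwrProducts, List.flatMap]
    rw [hsplit, List.filter_append, List.map_append, List.filter_map, List.filter_map,
      List.map_map, List.map_map]
    have hz1 : ∀ p : List Int, cwrMaskZ (x :: xs) ((1 : Int) :: p) 1 = x :: cwrMaskZ xs p 1 := by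
      intro p; simp [cwrMaskZ]
    have hz1' : ∀ p : List Int, cwrMaskZ (x :: xs) ((1 : Int) :: p) 0 = cwrMaskZ xs p 0 := by
      intro p; simp [cwrMaskZ]
    have hz0 : ∀ p : List Int, cwrMaskZ (x :: xs) ((0 : Int) :: p) 1 = cwrMaskZ xs p 1 := by
      intro p; simp [cwrMaskZ]
    have hz0' : ∀ p : List Int, cwrMaskZ (x :: xs) ((0 : Int) :: p) 0 = x :: cwrMaskZ xs p 0 := by
      intro p; simp [cwrMaskZ]
    have hf1 : (cwrProducts xs.length).filter ((fun p : List Int => decide (p.sum = rem)) ∘ (fun p => (1 : Int) :: p))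
        = (cwrProducts xs.length).filter (fun p => p.sum = rem - 1) := by
      apply List.filter_congr
      intro p _
      simp only [Function.comp, List.sum_cons, decide_eq_decide]
      omega
    have hf0 : (cwrProducts xs.length).filter ((fun p : List Int => decide (p.sum = rem)) ∘ (fun p => (0 : Int) :: p))
        = (cwrProducts xs.length).filter (fun p => p.sum = rem) := by
      apply List.filter_congr
      intro p _
      simp only [Function.comp, List.sum_cons, decide_eq_decide]
      omega
    rw [hf1, hf0]
    show cwrGo (x :: xs) rem chosen rest = _
    unfold cwrGo
    by_cases hrem : rem > 0
    · rw [if_pos hrem, ih (rem - 1) (chosen ++ [x]) rest, ih rem chosen (rest ++ [x])]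
      congr 1
      · apply List.map_congr_left
        intro p _
        simp [hz1, hz1', List.append_assoc]
      · apply List.map_congr_left
        intro p _
        simp [hz0, hz0', List.append_assoc]
    · rw [if_neg hrem, ih rem chosen (rest ++ [x])]
      have hnil : (cwrProducts xs.length).filter (fun p => p.sum = rem - 1) = [] := by
        rw [List.filter_eq_nil_iff]
        intro p hp
        have := (cwrProducts_mem hp).2
        simp only [decide_eq_true_eq]
        omega
      rw [hnil]
      simp only [List.map_nil, List.nil_append]
      apply List.map_congr_left
      intro p _
      simp [hz0, hz0', List.append_assoc]

-- ===== VERDICT (by name: the statement is the Claim_ definition above) =====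
theorem combinations_with_remainder_spec : Claim_equal_combinations_with_remainder := by
  intro iterable size _ hpre
  obtain ⟨h0, hle⟩ := hpre
  unfold Spec_combinations_with_remainder combinations_with_remainder combinations_with_remainder_alt
  rw [if_neg (by omega), if_neg (by omega), if_neg (by omega), if_neg (by omega)]
  rw [cwrGo_eq]
  apply List.map_congr_left
  intro p hp
  have hlen := (cwrProducts_mem (List.mem_of_mem_filter hp)).1
  simp [cwrMask_eq_maskZ iterable p _ hlen]
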